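-- pv_equiv track=rewrite | github.com/ITU-2019/AngleBasedOutlierDetection | build/graphing.py | median_outlier
-- ===== SOURCE A (Python) =====
-- def median_outlier(pair_list):
--     lowest_pos = 0
--     lowest_outlier = None
--     count = 0
--     outlier_count = 0
--     for pair in pair_list:
--         count += 1
--         if pair[0] <= 10:
--             outlier_count += 1
--             lowest_pos = count
--             lowest_outlier = pair[0]
--         if outlier_count >= 5:
--             return (lowest_pos, lowest_outlier)
--
--     return (lowest_pos, lowest_outlier)
-- ===== SOURCE B (Python) =====
-- def median_outlier(pair_list):
--     matches = [(i, pair[0]) for i, pair in enumerate(pair_list, 1) if pair[0] <= 10]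
--     if len(matches) >= 5:
--         return matches[4]
--     if matches:
--         return matches[-1]
--     return (0, None)
-- ===== Notes on version B (the rewrite author's own statement) =====
-- stated objective: simpler
-- what changed: Replaces the running-accumulator scan with early return by a two-phase strategy: collect all qualifying (position, value) pairs with one filtered enumerate comprehension, then select the 5th match, else the last match, else (0, None).
import Mathlib
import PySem

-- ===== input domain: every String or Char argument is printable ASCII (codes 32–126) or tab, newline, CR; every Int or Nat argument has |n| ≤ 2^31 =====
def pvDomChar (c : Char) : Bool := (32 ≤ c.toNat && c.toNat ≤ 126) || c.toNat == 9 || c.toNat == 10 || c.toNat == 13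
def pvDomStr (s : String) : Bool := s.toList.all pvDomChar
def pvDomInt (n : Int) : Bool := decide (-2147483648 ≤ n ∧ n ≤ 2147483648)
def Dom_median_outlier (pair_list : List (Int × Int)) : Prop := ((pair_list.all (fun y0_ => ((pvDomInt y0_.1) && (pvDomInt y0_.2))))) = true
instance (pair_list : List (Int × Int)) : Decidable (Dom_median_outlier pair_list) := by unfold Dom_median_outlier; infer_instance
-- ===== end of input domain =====

-- B collects all qualifying (1-based position, value) pairs in one comprehension-style pass
-- and then selects the 5th (or last, or (0, None)) in a separate phase; objective: simpler
-- two-phase decomposition, same cost, identical return values.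

-- ===== PORT A =====
-- literal transliteration of A's accumulator loop with early return at the 5th match
def medianOutlierLoop (l : List (Int × Int)) (lp : Int) (lo : Option Int) (count oc : Int) :
    Int × Option Int :=
  match l with
  | [] => (lp, lo)
  | p :: rest =>
    let count := count + 1
    let s : Int × Option Int × Int :=
      if p.1 ≤ 10 then (count, some p.1, oc + 1) else (lp, lo, oc)
    if 5 ≤ s.2.2 then (s.1, s.2.1) else medianOutlierLoop rest s.1 s.2.1 count s.2.2

def median_outlier (pair_list : List (Int × Int)) : Int × Option Int :=
  medianOutlierLoop pair_list 0 none 0 0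

-- ===== PORT B =====
-- matches = [(i, pair[0]) for i, pair in enumerate(pair_list, 1) if pair[0] <= 10]
def medianOutlierMatches (pair_list : List (Int × Int)) : List (Int × Int) :=
  ((PySem.List.enumerate pair_list 1).filter (fun ip => decide (ip.2.1 ≤ 10))).map
    (fun ip => (ip.1, ip.2.1))

def median_outlier_alt (pair_list : List (Int × Int)) : Int × Option Int :=
  let ms := medianOutlierMatches pair_list
  if h : 5 ≤ ms.length then
    ((ms[4]'(by omega)).1, some (ms[4]'(by omega)).2)
  else
    match ms.getLast? with
    | some m => (m.1, some m.2)
    | none => (0, none)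

-- ===== PRECONDITION & SPEC =====
def Spec_median_outlier (pair_list : List (Int × Int)) (out : Int × Option Int) : Prop := out = median_outlier_alt pair_list
instance (pair_list : List (Int × Int)) (out : Int × Option Int) : Decidable (Spec_median_outlier pair_list out) := by unfold Spec_median_outlier; infer_instance

-- ===== CLAIM (what is proved, stated in full; the proofs are below) =====
def Claim_equal_median_outlier : Prop := ∀ (pair_list : List (Int × Int)), Dom_median_outlier pair_list → Spec_median_outlier pair_list (median_outlier pair_list)

-- ===== LEMMAS AND PROOFS =====

-- qualifying matches of the suffix, given that `c` elements precede it (positions c+1, c+2, …)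
def matchesAt (c : Int) : List (Int × Int) → List (Int × Int)
  | [] => []
  | p :: r => if p.1 ≤ 10 then (c + 1, p.1) :: matchesAt (c + 1) r else matchesAt (c + 1) r

def mwrap (m : Int × Int) : Int × Option Int := (m.1, some m.2)

-- the common selection: k-th match if it exists, else last match, else the default
def pick (k : Nat) (dflt : Int × Option Int) (ms : List (Int × Int)) : Int × Option Int :=
  if h : k - 1 < ms.length then mwrap (ms[k - 1])
  else
    match ms.getLast? with
    | some m => mwrap m
    | none => dflt

lemma matches_eq (l : List (Int × Int)) : ∀ s : Int,
    ((PySem.List.enumerate l s).filter (fun ip => decide (ip.2.1 ≤ 10))).map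
      (fun ip => (ip.1, ip.2.1)) = matchesAt (s - 1) l := by
  induction l with
  | nil => intro s; simp [PySem.List.enumerate_nil, matchesAt]
  | cons p r ih =>
    intro s
    rw [PySem.List.enumerate_cons]
    have ihs := ih (s + 1)
    rw [show s + 1 - 1 = s by ring] at ihs
    by_cases hp : p.1 ≤ 10 <;>
      simp [hp, matchesAt, ihs, show s - 1 + 1 = s by ring]

lemma loop_eq_pick (l : List (Int × Int)) : ∀ (lp : Int) (lo : Option Int) (count : Int)
    (n : Nat), n ≤ 4 →
    medianOutlierLoop l lp lo count (n : Int) = pick (5 - n) (lp, lo) (matchesAt count l) := by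
  induction l with
  | nil =>
    intro lp lo count n hn
    have h1 : ¬ (5 - n - 1 < (0 : Nat)) := by omega
    simp [medianOutlierLoop, matchesAt, pick, h1]
  | cons p r ih =>
    intro lp lo count n hn
    by_cases hp : p.1 ≤ 10
    · rcases Nat.lt_or_ge n 4 with h4 | h4
      · -- not yet the 5th match: recurse
        have hlt : ¬ (5 : Int) ≤ (n : Int) + 1 := by
          omega
        have ihr := ih (count + 1) (some p.1) (count + 1) (n + 1) (by omega)
        rw [show ((n : Int) + 1) = ((n + 1 : Nat) : Int) by omega] at hlt
        simp only [medianOutlierLoop, hp, if_true, matchesAt]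
        rw [show ((n : Int) + 1) = ((n + 1 : Nat) : Int) by push_cast; ring, if_neg hlt, ihr]
        -- pick (4-n) (mwrap m) ms = pick (5-n) dflt (m :: ms)
        generalize matchesAt (count + 1) r = ms
        have hk1 : 5 - (n + 1) - 1 = 5 - n - 1 - 1 := by omega
        have hk2 : 1 ≤ 5 - n - 1 := by omega
        by_cases hl : 5 - n - 1 - 1 < ms.length
        · have hl' : 5 - n - 1 < ((count + 1, p.1) :: ms).length := by
            simp [List.length_cons]; omega
          rw [pick, pick, dif_pos (hk1 ▸ hl), dif_pos hl']
          congr 1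
          have hidx : 5 - n - 1 = (5 - (n + 1) - 1) + 1 := by omega
          simp only [hidx, List.getElem_cons_succ]
        · have hl' : ¬ (5 - n - 1 < ((count + 1, p.1) :: ms).length) := by
            simp [List.length_cons]; omega
          rw [pick, pick, dif_neg (hk1 ▸ hl), dif_neg hl']
          cases ms with
          | nil => simp [mwrap]
          | cons a as =>
            rw [List.getLast?_cons_cons]
            cases hgl : (a :: as).getLast? with
            | none => simp at hgl
            | some m => rfl
      · -- n = 4: this is the 5th match, early return
        have hn4 : n = 4 := by omega
        subst hn4
        have hge : (5 : Int) ≤ (4 : Int) + 1 := by norm_num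
        simp only [medianOutlierLoop, hp, ite_true, Nat.cast_ofNat, if_pos hge]
        have : (5 - 4 : Nat) - 1 = 0 := by norm_num
        simp [matchesAt, hp, pick, mwrap]
    · have hlt : ¬ (5 : Int) ≤ (n : Int) := by omega
      simp only [medianOutlierLoop, hp, ite_false, matchesAt, if_neg hlt]
      exact ih lp lo (count + 1) n hn

lemma select_eq_pick (ms : List (Int × Int)) :
    (if h : 5 ≤ ms.length then ((ms[4]'(by omega)).1, some (ms[4]'(by omega)).2)
     else match ms.getLast? with | some m => (m.1, some m.2) | none => ((0 : Int), none))
    = pick 5 (0, none) ms := by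
  by_cases h : 5 ≤ ms.length
  · have h4 : (5 : Nat) - 1 < ms.length := by omega
    rw [dif_pos h, pick, dif_pos h4]; rfl
  · have h4 : ¬ ((5 : Nat) - 1 < ms.length) := by omega
    rw [dif_neg h, pick, dif_neg h4]
    cases ms.getLast? <;> rfl

lemma alt_eq_pick (l : List (Int × Int)) :
    median_outlier_alt l = pick 5 (0, none) (matchesAt 0 l) := by
  have hm : medianOutlierMatches l = matchesAt 0 l := by
    have := matches_eq l 1
    simpa [medianOutlierMatches] using this
  have h1 : median_outlier_alt l = pick 5 (0, none) (medianOutlierMatches l) :=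
    select_eq_pick _
  rw [h1, hm]

-- ===== VERDICT (by name: the statement is the Claim_ definition above) =====
theorem median_outlier_spec : Claim_equal_median_outlier := by
  intro l _
  show median_outlier l = median_outlier_alt l
  rw [alt_eq_pick]
  have := loop_eq_pick l 0 none 0 0 (by omega)
  simpa [median_outlier] using this
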